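-- pv_equiv track=rewrite | github.com/camilokawerin/personal-politico-corrientes | scripts/helpers/analisis_candidatos_1946.py | analizar_partidos_previos
-- ===== SOURCE A (Python) =====
-- from collections import Counter
--
-- def analizar_partidos_previos(candidatos):
--     """
--     Analiza y cuenta los partidos previos de los candidatos, agrupando por persona
--     y seleccionando el partido más representativo para cada una según las siguientes prioridades:
--     1. Si tiene partidos radicales, autonomistas o liberales, prioriza estos
--     2. Si no, toma el más reciente
--
--     Args:
--         candidatos (list): Lista de candidatos con experiencia previa
--
--     Returns:
--         Counter: Contador con la distribución de partidos previos (un partido por persona)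
--     """
--     contador_partidos = Counter()
--     personas_procesadas = set()
--
--     for c in candidatos:
--         id_persona = c.get('id_persona')
--
--         # Evitar contar la misma persona más de una vez
--         if id_persona in personas_procesadas:
--             continue
--
--         if c.get('partidos_previos'):
--             # Dividir los partidos separados por comas
--             partidos = [p.strip() for p in c['partidos_previos'].split(', ') if p.strip()]
--
--             if partidos:
--                 # Buscar primero partidos de las familias principales (radical, autonomista, liberal)
--                 partido_seleccionado = None
--
--                 # Prioridad 1: Buscar partidos radicales
--                 for partido in partidos:
--                     if 'radical' in partido.lower():
--                         partido_seleccionado = partido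
--                         break
--
--                 # Prioridad 2: Si no hay radicales, buscar autonomistas
--                 if not partido_seleccionado:
--                     for partido in partidos:
--                         if 'autonom' in partido.lower():
--                             partido_seleccionado = partido
--                             break
--
--                 # Prioridad 3: Si no hay radicales ni autonomistas, buscar liberales
--                 if not partido_seleccionado:
--                     for partido in partidos:
--                         if 'liberal' in partido.lower():
--                             partido_seleccionado = partido
--                             break
--
--                 # Prioridad 4: Si no hay ninguno de los anteriores, tomar el más reciente (primero en la lista)
--                 if not partido_seleccionado:
--                     partido_seleccionado = partidos[0]
--
--                 contador_partidos[partido_seleccionado] += 1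
--                 personas_procesadas.add(id_persona)
--
--     return contador_partidos
-- ===== SOURCE B (Python) =====
-- from collections import Counter
--
-- def _rango(partido):
--     p = partido.lower()
--     if 'radical' in p:
--         return 0
--     if 'autonom' in p:
--         return 1
--     if 'liberal' in p:
--         return 2
--     return 3
--
-- def analizar_partidos_previos(candidatos):
--     # Phase 1: pick one representative party per person (first record wins),
--     # using min with a priority key instead of staged searches.
--     seleccion = {}
--     for c in candidatos:
--         pid = c.get('id_persona')
--         if pid in seleccion:
--             continue
--         texto = c.get('partidos_previos')
--         if texto:
--             partidos = [p.strip() for p in texto.split(', ') if p.strip()]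
--             if partidos:
--                 seleccion[pid] = min(partidos, key=_rango)
--     # Phase 2: count the selections.
--     return Counter(seleccion.values())
-- ===== Notes on version B (the rewrite author's own statement) =====
-- stated objective: alternative
-- what changed: B splits the task into two phases: it first builds a dict mapping each person id to its representative party chosen by min(partidos, key=rank) instead of A's three sequential priority search loops plus fallback, then produces the Counter in one final pass over the dict's values; A instead interleaves a seen-set, the staged searches and counter increments in a single loop.
import Mathlib
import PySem

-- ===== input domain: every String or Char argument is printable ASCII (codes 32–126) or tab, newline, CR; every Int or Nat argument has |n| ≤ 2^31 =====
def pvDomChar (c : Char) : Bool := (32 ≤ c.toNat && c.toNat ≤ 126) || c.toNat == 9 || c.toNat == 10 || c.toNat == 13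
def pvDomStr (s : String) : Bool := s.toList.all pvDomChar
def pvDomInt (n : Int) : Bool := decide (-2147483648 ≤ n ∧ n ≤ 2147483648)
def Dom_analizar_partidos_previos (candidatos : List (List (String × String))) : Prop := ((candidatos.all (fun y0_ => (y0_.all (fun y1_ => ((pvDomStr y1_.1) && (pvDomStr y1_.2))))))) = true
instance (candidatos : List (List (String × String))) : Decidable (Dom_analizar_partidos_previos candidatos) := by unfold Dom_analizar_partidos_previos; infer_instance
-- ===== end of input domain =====

-- B restructures A into two phases: a dict of one representative party per person,
-- chosen by min with a priority key, then one counting pass over the dict's values.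

-- ===== PORT A =====
-- the three membership tests 'radical'/'autonom'/'liberal' in partido.lower()
def pvRad (p : String) : Bool := PySem.Str.isIn "radical" (PySem.Str.lower p)
def pvAut (p : String) : Bool := PySem.Str.isIn "autonom" (PySem.Str.lower p)
def pvLib (p : String) : Bool := PySem.Str.isIn "liberal" (PySem.Str.lower p)

-- one candidate record (a Python dict): the guards, split/strip/filter, the three
-- priority search loops with break, and the fall-back to partidos[0], line by line
def pvStepA (st : PySem.Dict String Int × PySem.Set (Option String))
    (c : List (String × String)) : PySem.Dict String Int × PySem.Set (Option String) :=
  let d := PySem.Dict.ofList c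
  let id_persona := d.get? "id_persona"
  if PySem.Set.contains st.2 id_persona then st
  else
    match d.get? "partidos_previos" with
    | none => st
    | some pv =>
      if pv = "" then st
      else
        let partidos := (((PySem.Str.split? pv ", ").getD []).filter
            (fun p => PySem.Str.strip p != "")).map PySem.Str.strip
        match partidos with
        | [] => st
        | p0 :: _ =>
          let s1 := partidos.find? pvRad
          let s2 := s1.or (partidos.find? pvAut)   -- 'if not partido_seleccionado: ...' — keep s1 if set
          let s3 := s2.or (partidos.find? pvLib)
          let sel := s3.getD p0
          (PySem.Dict.modify st.1 sel 0 (fun n => n + 1), PySem.Set.add st.2 id_persona)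

def analizar_partidos_previos (candidatos : List (List (String × String))) : List (String × Int) :=
  (candidatos.foldl pvStepA (PySem.Dict.empty, PySem.Set.empty)).1.items

-- ===== PORT B =====
-- Source B's helper _rango
def pvRank (partido : String) : Nat :=
  let p := PySem.Str.lower partido
  if PySem.Str.isIn "radical" p then 0
  else if PySem.Str.isIn "autonom" p then 1
  else if PySem.Str.isIn "liberal" p then 2
  else 3

-- phase 1, one record: 'if pid in seleccion: continue', the truthiness guards,
-- and 'seleccion[pid] = min(partidos, key=_rango)' (min? none ↔ the list is empty)
def pvSelect (sel : PySem.Dict (Option String) String)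
    (c : List (String × String)) : PySem.Dict (Option String) String :=
  let d := PySem.Dict.ofList c
  let pid := d.get? "id_persona"
  if sel.contains pid then sel
  else
    match d.get? "partidos_previos" with
    | none => sel
    | some texto =>
      if texto = "" then sel
      else
        let partidos := (((PySem.Str.split? texto ", ").getD []).filter
            (fun p => PySem.Str.strip p != "")).map PySem.Str.strip
        match PySem.List.min? partidos pvRank with
        | none => sel
        | some m => sel.insert pid m

-- phase 2: Counter(seleccion.values())
def analizar_partidos_previos_alt (candidatos : List (List (String × String))) : List (String × Int) :=
  let seleccion := candidatos.foldl pvSelect PySem.Dict.empty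
  (PySem.Dict.counter seleccion.values).items

-- ===== PRECONDITION & SPEC =====
def Spec_analizar_partidos_previos (candidatos : List (List (String × String))) (out : List (String × Int)) : Prop := out = analizar_partidos_previos_alt candidatos
instance (candidatos : List (List (String × String))) (out : List (String × Int)) : Decidable (Spec_analizar_partidos_previos candidatos out) := by unfold Spec_analizar_partidos_previos; infer_instance

-- ===== CLAIM (what is proved, stated in full; the proofs are below) =====
def Claim_equal_analizar_partidos_previos : Prop := ∀ (candidatos : List (List (String × String))), Dom_analizar_partidos_previos candidatos → Spec_analizar_partidos_previos candidatos (analizar_partidos_previos candidatos)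

-- ===== LEMMAS AND PROOFS =====

def pvMinRank (l : List String) : Nat := l.foldr (fun p m => min (pvRank p) m) 4

theorem pvRank_le_three (p : String) : pvRank p ≤ 3 := by
  simp only [pvRank]; split_ifs <;> omega

theorem pvRank_eq_zero (p : String) : (pvRank p = 0) ↔ pvRad p = true := by
  simp only [pvRank, pvRad]; split_ifs <;> simp_all

theorem pvRank_eq_one (p : String) : (pvRank p = 1) ↔ (pvRad p = false ∧ pvAut p = true) := by
  simp only [pvRank, pvRad, pvAut]; split_ifs <;> simp_all

theorem pvRank_eq_two (p : String) :
    (pvRank p = 2) ↔ (pvRad p = false ∧ pvAut p = false ∧ pvLib p = true) := by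
  simp only [pvRank, pvRad, pvAut, pvLib]; split_ifs <;> simp_all

theorem pvRank_eq_three (p : String) :
    (pvRank p = 3) ↔ (pvRad p = false ∧ pvAut p = false ∧ pvLib p = false) := by
  simp only [pvRank, pvRad, pvAut, pvLib]; split_ifs <;> simp_all

theorem pvMinRank_nil : pvMinRank [] = 4 := rfl

theorem pvMinRank_cons (p : String) (t : List String) :
    pvMinRank (p :: t) = min (pvRank p) (pvMinRank t) := rfl

theorem pvMinRank_le {p : String} {l : List String} (h : p ∈ l) : pvMinRank l ≤ pvRank p := by
  induction l with
  | nil => cases h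
  | cons q t ih =>
    rw [pvMinRank_cons]
    rcases List.mem_cons.mp h with rfl | hm
    · omega
    · have := ih hm; omega

theorem pvMinRank_attained {l : List String} (h : l ≠ []) :
    ∃ p ∈ l, pvRank p = pvMinRank l := by
  induction l with
  | nil => exact absurd rfl h
  | cons q t ih =>
    rw [pvMinRank_cons]
    by_cases ht : t = []
    · subst ht
      refine ⟨q, List.mem_cons_self, ?_⟩
      have := pvRank_le_three q
      rw [pvMinRank_nil]; omega
    · obtain ⟨p, hp, hpr⟩ := ih ht
      by_cases hc : pvRank q ≤ pvMinRank t
      · exact ⟨q, List.mem_cons_self, by omega⟩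
      · exact ⟨p, List.mem_cons_of_mem _ hp, by omega⟩

theorem pvFind?_congr_mem {α : Type} {l : List α} {p q : α → Bool}
    (h : ∀ x ∈ l, p x = q x) : l.find? p = l.find? q := by
  induction l with
  | nil => rfl
  | cons a t ih =>
    simp only [List.find?]
    rw [h a List.mem_cons_self]
    cases q a
    · exact ih fun x hx => h x (List.mem_cons_of_mem _ hx)
    · rfl

-- the running-minimum fold inside min? keeps the first element of minimum rank
theorem pvMinFold_char (l : List String) (b : String) :
    l.foldl (fun m x => if pvRank x < pvRank m then x else m) b
      = if pvMinRank l < pvRank b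
          then (l.find? (fun p => pvRank p == pvMinRank l)).getD b
          else b := by
  induction l generalizing b with
  | nil =>
    rw [pvMinRank_nil]
    have := pvRank_le_three b
    rw [if_neg (by omega)]
    rfl
  | cons p t ih =>
    rw [pvMinRank_cons]
    simp only [List.foldl]
    by_cases h : pvRank p < pvRank b
    · simp only [if_pos h]
      rw [ih p]
      by_cases h2 : pvMinRank t < pvRank p
      · have hmin : min (pvRank p) (pvMinRank t) = pvMinRank t := by omega
        have htne : t ≠ [] := by
          intro he; rw [he, pvMinRank_nil] at h2
          have := pvRank_le_three p; omega
        obtain ⟨x, hx, hxr⟩ := pvMinRank_attained htne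
        have hsome : (t.find? (fun q => pvRank q == pvMinRank t)).isSome := by
          rw [List.find?_isSome]; exact ⟨x, hx, by simp [hxr]⟩
        obtain ⟨r, hr⟩ := Option.isSome_iff_exists.mp hsome
        rw [if_pos h2, hmin, if_pos (by omega)]
        simp only [List.find?]
        have hne : (pvRank p == pvMinRank t) = false := by simp; omega
        rw [hne, hr]
        simp
      · have hmin : min (pvRank p) (pvMinRank t) = pvRank p := by omega
        rw [if_neg h2, hmin, if_pos (by omega)]
        simp only [List.find?]
        rw [show (pvRank p == pvRank p) = true by simp]
        simp
    · simp only [if_neg h]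
      rw [ih b]
      by_cases h2 : pvMinRank t < pvRank b
      · have hmin : min (pvRank p) (pvMinRank t) = pvMinRank t := by omega
        rw [if_pos h2, hmin, if_pos (by omega)]
        simp only [List.find?]
        have hne : (pvRank p == pvMinRank t) = false := by simp; omega
        rw [hne]
      · have h3 : ¬ min (pvRank p) (pvMinRank t) < pvRank b := by omega
        rw [if_neg h2, if_neg h3]

-- min(partidos, key=_rango) is the first party of minimum rank
theorem pvMin?_char (p0 : String) (t : List String) :
    PySem.List.min? (p0 :: t) pvRank
      = some (((p0 :: t).find? (fun p => pvRank p == pvMinRank (p0 :: t))).getD p0) := by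
  have hfold : PySem.List.min? (p0 :: t) pvRank
      = some (t.foldl (fun m x => if pvRank x < pvRank m then x else m) p0) := by
    simp only [PySem.List.min?, List.foldl]
    induction t generalizing p0 with
    | nil => rfl
    | cons q t ih =>
      simp only [List.foldl]
      by_cases h : pvRank q < pvRank p0
      · rw [if_pos h, if_pos h]; exact ih q
      · rw [if_neg h, if_neg h]; exact ih p0
  rw [hfold, pvMinFold_char t p0, pvMinRank_cons]
  by_cases h2 : pvMinRank t < pvRank p0
  · rw [if_pos h2]
    have hmin : min (pvRank p0) (pvMinRank t) = pvMinRank t := by omega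
    rw [hmin]
    simp only [List.find?]
    have hne : (pvRank p0 == pvMinRank t) = false := by simp; omega
    rw [hne]
  · rw [if_neg h2]
    have hmin : min (pvRank p0) (pvMinRank t) = pvRank p0 := by omega
    rw [hmin]
    simp only [List.find?]
    rw [show (pvRank p0 == pvRank p0) = true by simp]
    simp

-- A's three-loop chain selects the first party of minimum rank
theorem pvChain_char (p0 : String) (t : List String) :
    ((((p0 :: t).find? pvRad).or ((p0 :: t).find? pvAut)).or ((p0 :: t).find? pvLib)).getD p0
      = ((p0 :: t).find? (fun p => pvRank p == pvMinRank (p0 :: t))).getD p0 := by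
  have hne : (p0 :: t) ≠ [] := by simp
  obtain ⟨q, hq, hqr⟩ := pvMinRank_attained hne
  have hq3 : pvRank q ≤ 3 := pvRank_le_three q
  have hge : ∀ x ∈ (p0 :: t), pvMinRank (p0 :: t) ≤ pvRank x := fun x hx => pvMinRank_le hx
  have hcase : pvMinRank (p0 :: t) = 0 ∨ pvMinRank (p0 :: t) = 1 ∨
      pvMinRank (p0 :: t) = 2 ∨ pvMinRank (p0 :: t) = 3 := by omega
  rcases hcase with hm | hm | hm | hm <;> rw [hm]
  · -- min rank 0: first radical party is selected
    have hrad : ((p0 :: t).find? pvRad).isSome := by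
      rw [List.find?_isSome]
      exact ⟨q, hq, (pvRank_eq_zero q).mp (by omega)⟩
    obtain ⟨r, hr⟩ := Option.isSome_iff_exists.mp hrad
    have hcg : (p0 :: t).find? (fun p => pvRank p == 0) = (p0 :: t).find? pvRad := by
      apply pvFind?_congr_mem
      intro x _
      by_cases h : pvRad x = true
      · simp [h, (pvRank_eq_zero x).mpr h]
      · have : pvRank x ≠ 0 := fun hc => h ((pvRank_eq_zero x).mp hc)
        simp_all
    rw [hcg, hr]
    rfl
  · -- min rank 1: no radicals, first autonomista is selected
    have hnorad : ∀ x ∈ (p0 :: t), pvRad x = false := by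
      intro x hx
      by_contra hc
      have h0 : pvRank x = 0 := (pvRank_eq_zero x).mpr (by revert hc; cases pvRad x <;> simp)
      have := hge x hx; omega
    have h1 : (p0 :: t).find? pvRad = none := List.find?_eq_none.mpr (by
      intro x hx; simp [hnorad x hx])
    have haut : ((p0 :: t).find? pvAut).isSome := by
      rw [List.find?_isSome]
      exact ⟨q, hq, ((pvRank_eq_one q).mp (by omega)).2⟩
    obtain ⟨r, hr⟩ := Option.isSome_iff_exists.mp haut
    have hcg : (p0 :: t).find? (fun p => pvRank p == 1) = (p0 :: t).find? pvAut := by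
      apply pvFind?_congr_mem
      intro x hx
      by_cases h : pvAut x = true
      · simp [h, (pvRank_eq_one x).mpr ⟨hnorad x hx, h⟩]
      · have : pvRank x ≠ 1 := fun hc => h ((pvRank_eq_one x).mp hc).2
        simp_all
    rw [hcg, h1, hr]
    rfl
  · -- min rank 2: no radicals or autonomistas, first liberal is selected
    have hno : ∀ x ∈ (p0 :: t), pvRad x = false ∧ pvAut x = false := by
      intro x hx
      have hx3 := pvRank_le_three x
      have := hge x hx
      constructor
      · by_contra hc
        have h0 : pvRank x = 0 := (pvRank_eq_zero x).mpr (by revert hc; cases pvRad x <;> simp)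
        omega
      · by_contra hc
        have hA : pvAut x = true := by revert hc; cases pvAut x <;> simp
        have hR : pvRad x = false := by
          by_contra hc2
          have h0 : pvRank x = 0 :=
            (pvRank_eq_zero x).mpr (by revert hc2; cases pvRad x <;> simp)
          omega
        have h1 : pvRank x = 1 := (pvRank_eq_one x).mpr ⟨hR, hA⟩
        omega
    have h1 : (p0 :: t).find? pvRad = none := List.find?_eq_none.mpr (by
      intro x hx; simp [(hno x hx).1])
    have h2 : (p0 :: t).find? pvAut = none := List.find?_eq_none.mpr (by
      intro x hx; simp [(hno x hx).2])
    have hlib : ((p0 :: t).find? pvLib).isSome := by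
      rw [List.find?_isSome]
      exact ⟨q, hq, ((pvRank_eq_two q).mp (by omega)).2.2⟩
    obtain ⟨r, hr⟩ := Option.isSome_iff_exists.mp hlib
    have hcg : (p0 :: t).find? (fun p => pvRank p == 2) = (p0 :: t).find? pvLib := by
      apply pvFind?_congr_mem
      intro x hx
      by_cases h : pvLib x = true
      · simp [h, (pvRank_eq_two x).mpr ⟨(hno x hx).1, (hno x hx).2, h⟩]
      · have : pvRank x ≠ 2 := fun hc => h ((pvRank_eq_two x).mp hc).2.2
        simp_all
    rw [hcg, h1, h2, hr]
    rfl
  · -- min rank 3: no family party at all, fall back to the first element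
    have hall : ∀ x ∈ (p0 :: t), pvRank x = 3 := by
      intro x hx
      have := hge x hx
      have := pvRank_le_three x
      omega
    have hno : ∀ x ∈ (p0 :: t), pvRad x = false ∧ pvAut x = false ∧ pvLib x = false :=
      fun x hx => (pvRank_eq_three x).mp (hall x hx)
    have h1 : (p0 :: t).find? pvRad = none := List.find?_eq_none.mpr (by
      intro x hx; simp [(hno x hx).1])
    have h2 : (p0 :: t).find? pvAut = none := List.find?_eq_none.mpr (by
      intro x hx; simp [(hno x hx).2.1])
    have h3 : (p0 :: t).find? pvLib = none := List.find?_eq_none.mpr (by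
      intro x hx; simp [(hno x hx).2.2])
    have hhead : (p0 :: t).find? (fun p => pvRank p == 3) = some p0 := by
      simp only [List.find?]
      rw [show (pvRank p0 == 3) = true by simp [hall p0 List.mem_cons_self]]
    rw [h1, h2, h3, hhead]
    rfl

theorem pvSetContains_eq_dictContains (sel : PySem.Dict (Option String) String)
    (pid : Option String) : PySem.Set.contains sel.keys pid = sel.contains pid := by
  rw [PySem.Dict.contains_eq_decide_mem_keys]
  simp [PySem.Set.contains]

-- the loop invariant: running A's loop from (Counter of sel's values, sel's keys)
-- produces the Counter of the values of B's finished selection dict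
theorem pvInvariant (cs : List (List (String × String)))
    (sel : PySem.Dict (Option String) String) (hnd : sel.keys.Nodup) :
    (cs.foldl pvStepA (PySem.Dict.counter sel.values, sel.keys)).1
      = PySem.Dict.counter ((cs.foldl pvSelect sel).values) := by
  induction cs generalizing sel with
  | nil => rfl
  | cons c t ih =>
    simp only [List.foldl]
    have hstep : pvStepA (PySem.Dict.counter sel.values, sel.keys) c
        = (PySem.Dict.counter (pvSelect sel c).values, (pvSelect sel c).keys) ∧
        (pvSelect sel c).keys.Nodup := by
      simp only [pvStepA, pvSelect]
      rw [pvSetContains_eq_dictContains]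
      cases hc : PySem.Dict.contains sel (PySem.Dict.get? (PySem.Dict.ofList c) "id_persona") with
      | true => exact ⟨rfl, hnd⟩
      | false =>
        rw [if_neg (by simp), if_neg (by simp)]
        cases hp : PySem.Dict.get? (PySem.Dict.ofList c) "partidos_previos" with
        | none => exact ⟨rfl, hnd⟩
        | some pv =>
          dsimp only
          by_cases hpv : pv = ""
          · rw [if_pos hpv, if_pos hpv]; exact ⟨rfl, hnd⟩
          · rw [if_neg hpv, if_neg hpv]
            cases hl : (((PySem.Str.split? pv ", ").getD []).filter
                (fun p => PySem.Str.strip p != "")).map PySem.Str.strip with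
            | nil => exact ⟨rfl, hnd⟩
            | cons p0 tp =>
              dsimp only
              rw [pvMin?_char p0 tp]
              dsimp only
              set pid := PySem.Dict.get? (PySem.Dict.ofList c) "id_persona" with hpid
              set m := ((p0 :: tp).find? (fun p => pvRank p == pvMinRank (p0 :: tp))).getD p0
                with hmdef
              refine ⟨?_, PySem.Dict.nodup_keys_insert _ _ _ hnd⟩
              have hvals : (sel.insert pid m).values = sel.values ++ [m] := by
                simp only [PySem.Dict.values]
                rw [PySem.Dict.items_insert_of_not_contains sel m hc]
                simp
              have hkeys : (sel.insert pid m).keys = sel.keys ++ [pid] :=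
                PySem.Dict.keys_insert_of_not_contains sel m hc
              have hadd : PySem.Set.add sel.keys pid = sel.keys ++ [pid] := by
                simp only [PySem.Set.add]
                rw [pvSetContains_eq_dictContains, hc]
                simp
              rw [hvals, PySem.Dict.counter_append_singleton, hkeys, hadd,
                pvChain_char p0 tp, ← hmdef]
    rw [hstep.1, ih _ hstep.2]

-- ===== VERDICT (by name: the statement is the Claim_ definition above) =====
theorem analizar_partidos_previos_spec : Claim_equal_analizar_partidos_previos := by
  intro candidatos _
  unfold Spec_analizar_partidos_previos analizar_partidos_previos analizar_partidos_previos_alt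
  have h := pvInvariant candidatos PySem.Dict.empty (by simp [pysem])
  simpa using congrArg PySem.Dict.items h
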